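-- pv_equiv track=rewrite | github.com/bolivierjr/advent-of-code | 2022/Day03/solutions.py | find_sum_of_priorities
-- ===== SOURCE A (Python) =====
-- import string
--
-- LOWER_ALPHA = string.ascii_lowercase
--
-- UPPER_ALPHA = string.ascii_uppercase
--
-- def find_sum_of_priorities(duplicate_types: str):
--     sum_of_priorities = 0
--
--     for item_type in duplicate_types:
--         found_type = False
--
--         for lower_index, lower_letter in enumerate(LOWER_ALPHA):
--             if item_type == lower_letter:
--                 found_type = True
--                 sum_of_priorities += lower_index + 1  # 1 through 26
--                 break
--
--         if found_type:
--             continue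
--
--         for upper_index, upper_letter in enumerate(UPPER_ALPHA):
--             if item_type == upper_letter:
--                 sum_of_priorities += upper_index + 27  # 26 through 52
--                 break
--
--     return sum_of_priorities
-- ===== SOURCE B (Python) =====
-- def find_sum_of_priorities(duplicate_types: str):
--     total = 0
--     for c in duplicate_types:
--         if 'a' <= c <= 'z':
--             total += ord(c) - 96
--         elif 'A' <= c <= 'Z':
--             total += ord(c) - 38
--     return total
-- ===== Notes on version B (the rewrite author's own statement) =====
-- stated objective: faster
-- what changed: Replaces the per-character linear scan over the two 26-letter alphabet strings with a direct ord() arithmetic formula guarded by ASCII range comparisons.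
import Mathlib
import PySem

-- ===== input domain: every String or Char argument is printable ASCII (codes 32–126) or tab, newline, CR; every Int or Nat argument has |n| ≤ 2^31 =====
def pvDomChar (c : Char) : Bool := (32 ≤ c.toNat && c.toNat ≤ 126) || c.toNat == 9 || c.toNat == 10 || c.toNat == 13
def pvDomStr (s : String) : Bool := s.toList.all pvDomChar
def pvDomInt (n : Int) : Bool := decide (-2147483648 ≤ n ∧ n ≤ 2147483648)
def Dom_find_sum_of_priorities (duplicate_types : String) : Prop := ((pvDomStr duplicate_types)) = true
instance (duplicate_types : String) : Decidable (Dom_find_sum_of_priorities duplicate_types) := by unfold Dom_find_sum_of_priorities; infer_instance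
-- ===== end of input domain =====

-- B replaces A's linear scan over the alphabet strings with direct ASCII arithmetic (faster by a constant factor).
-- ===== PORT A =====
def pvLowerAlpha : List Char := "abcdefghijklmnopqrstuvwxyz".toList
def pvUpperAlpha : List Char := "ABCDEFGHIJKLMNOPQRSTUVWXYZ".toList

-- inner 'for lower_index, lower_letter in enumerate(LOWER_ALPHA)' loop: returns (found_type, amount added)
def pvLowerLoop (c : Char) : List (Int × Char) → (Bool × Int)
  | [] => (false, 0)
  | (i, l) :: rest => if c = l then (true, i + 1) else pvLowerLoop c rest

-- inner 'for upper_index, upper_letter in enumerate(UPPER_ALPHA)' loop: returns amount added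
def pvUpperLoop (c : Char) : List (Int × Char) → Int
  | [] => 0
  | (i, u) :: rest => if c = u then i + 27 else pvUpperLoop c rest

def find_sum_of_priorities (duplicate_types : String) : Int :=
  duplicate_types.toList.foldl (fun sum_of_priorities item_type =>
    let (found_type, add) := pvLowerLoop item_type (PySem.List.enumerate pvLowerAlpha)
    if found_type then sum_of_priorities + add
    else sum_of_priorities + pvUpperLoop item_type (PySem.List.enumerate pvUpperAlpha)) 0

-- ===== PORT B =====
def find_sum_of_priorities_alt (duplicate_types : String) : Int :=
  duplicate_types.toList.foldl (fun total c =>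
    if 'a' ≤ c ∧ c ≤ 'z' then total + ((c.toNat : Int) - 96)
    else if 'A' ≤ c ∧ c ≤ 'Z' then total + ((c.toNat : Int) - 38)
    else total) 0

-- ===== PRECONDITION & SPEC =====
def Spec_find_sum_of_priorities (duplicate_types : String) (out : Int) : Prop := out = find_sum_of_priorities_alt duplicate_types
instance (duplicate_types : String) (out : Int) : Decidable (Spec_find_sum_of_priorities duplicate_types out) := by unfold Spec_find_sum_of_priorities; infer_instance

-- ===== CLAIM (what is proved, stated in full; the proofs are below) =====
def Claim_equal_find_sum_of_priorities : Prop := ∀ (duplicate_types : String), Dom_find_sum_of_priorities duplicate_types → Spec_find_sum_of_priorities duplicate_types (find_sum_of_priorities duplicate_types)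

-- ===== LEMMAS AND PROOFS =====
-- per-character agreement of the two step functions, for every character the domain admits
set_option maxRecDepth 8192 in
lemma pv_step_eq_ofNat : ∀ n < 127,
    (let (f, a) := pvLowerLoop (Char.ofNat n) (PySem.List.enumerate pvLowerAlpha)
     if f then a else pvUpperLoop (Char.ofNat n) (PySem.List.enumerate pvUpperAlpha)) =
    (if 'a' ≤ Char.ofNat n ∧ Char.ofNat n ≤ 'z' then ((Char.ofNat n).toNat : Int) - 96
     else if 'A' ≤ Char.ofNat n ∧ Char.ofNat n ≤ 'Z' then ((Char.ofNat n).toNat : Int) - 38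
     else 0) := by decide

lemma pv_step_eq (c : Char) (hc : pvDomChar c = true) :
    (let (f, a) := pvLowerLoop c (PySem.List.enumerate pvLowerAlpha)
     if f then a else pvUpperLoop c (PySem.List.enumerate pvUpperAlpha)) =
    (if 'a' ≤ c ∧ c ≤ 'z' then ((c.toNat : Int) - 96)
     else if 'A' ≤ c ∧ c ≤ 'Z' then ((c.toNat : Int) - 38)
     else 0) := by
  have hlt : c.toNat < 127 := by
    simp [pvDomChar] at hc
    omega
  have h := pv_step_eq_ofNat c.toNat hlt
  rwa [Char.ofNat_toNat] at h

lemma pv_fold_eq (l : List Char) (h : l.all pvDomChar = true) : ∀ acc : Int,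
    l.foldl (fun sum_of_priorities item_type =>
      let (found_type, add) := pvLowerLoop item_type (PySem.List.enumerate pvLowerAlpha)
      if found_type then sum_of_priorities + add
      else sum_of_priorities + pvUpperLoop item_type (PySem.List.enumerate pvUpperAlpha)) acc =
    l.foldl (fun total c =>
      if 'a' ≤ c ∧ c ≤ 'z' then total + ((c.toNat : Int) - 96)
      else if 'A' ≤ c ∧ c ≤ 'Z' then total + ((c.toNat : Int) - 38)
      else total) acc := by
  induction l with
  | nil => intro acc; rfl
  | cons c rest ih =>
    intro acc
    simp only [List.all_cons, Bool.and_eq_true] at h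
    have hstep := pv_step_eq c h.1
    simp only [List.foldl_cons]
    rw [ih h.2]
    congr 1
    split_ifs at hstep ⊢ <;> simp_all

-- ===== VERDICT (by name: the statement is the Claim_ definition above) =====
theorem find_sum_of_priorities_spec : Claim_equal_find_sum_of_priorities := by
  intro s hdom
  unfold Spec_find_sum_of_priorities find_sum_of_priorities find_sum_of_priorities_alt
  exact pv_fold_eq s.toList hdom 0
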